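-- pv_equiv track=rewrite | github.com/Yashasvii/Project-Euler-Solutions-hackerrank | 009.py | pytha_calc
-- ===== SOURCE A (Python) =====
-- def pytha_calc(N):
--     largest = -1
--     for a in range(1, N - 4):
--         b = (N**2-2*a*N)//(2*N-2*a)
--         if b >= 2:
--             c = N - a - b
--             if a ** 2 + b ** 2 == c ** 2:
--                 product = a * b * c
--                 if largest < product:
--                     largest = product
--
--     return largest
-- ===== SOURCE B (Python) =====
-- def pytha_calc(N):
--     best = -1
--     m = 2
--     while 2 * m * (m + 1) <= N:
--         for n in range(1, m):
--             d = 2 * m * (m + n)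
--             if N % d == 0:
--                 k = N // d
--                 p = k * (m * m - n * n) * (2 * k * m * n) * (k * (m * m + n * n))
--                 if p > best:
--                     best = p
--         m += 1
--     return best
-- ===== Notes on version B (the rewrite author's own statement) =====
-- stated objective: faster
-- what changed: Instead of scanning every candidate leg a in [1, N-5] and probing b by floor division, B enumerates Pythagorean triples directly via Euclid's parametrisation (m,n,k): for each m with 2m(m+1) <= N and each n < m it checks whether the perimeter 2m(m+n) divides N and takes the max product k^3(m^2-n^2)(2mn)(m^2+n^2).
import Mathlib
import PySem

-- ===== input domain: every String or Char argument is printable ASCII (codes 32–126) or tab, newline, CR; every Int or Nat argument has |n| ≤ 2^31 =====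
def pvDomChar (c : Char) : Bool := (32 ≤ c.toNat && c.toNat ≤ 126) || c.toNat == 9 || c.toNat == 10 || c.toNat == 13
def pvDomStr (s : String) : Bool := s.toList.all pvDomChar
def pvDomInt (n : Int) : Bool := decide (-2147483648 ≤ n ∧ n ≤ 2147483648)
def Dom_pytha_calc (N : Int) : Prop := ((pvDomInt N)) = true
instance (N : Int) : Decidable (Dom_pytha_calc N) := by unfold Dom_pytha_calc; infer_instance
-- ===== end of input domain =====

-- B replaces A's O(N) scan over candidate legs by Euclid's parametrisation of
-- Pythagorean triples (m,n,k with perimeter 2m(m+n) dividing N); objective: faster.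


-- ===== PORT A =====
def pytha_calc (N : Int) : Int :=
  (PySem.List.pyRange 1 (N - 4) 1).foldl (fun largest a =>
    let b := PySem.Int.floordiv (N ^ 2 - 2 * a * N) (2 * N - 2 * a)
    if 2 ≤ b then
      let c := N - a - b
      if a ^ 2 + b ^ 2 = c ^ 2 then
        let product := a * b * c
        if largest < product then product else largest
      else largest
    else largest) (-1)

-- ===== PORT B =====
-- inner `for n in range(1, m)` loop of Source B
def pvAltInner (N m best : Int) : Int :=
  (PySem.List.pyRange 1 m 1).foldl (fun best n =>
    let d := 2 * m * (m + n)
    if PySem.Int.mod N d = 0 then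
      let k := PySem.Int.floordiv N d
      let p := k * (m * m - n * n) * (2 * k * m * n) * (k * (m * m + n * n))
      if best < p then p else best
    else best) best

-- outer `while 2*m*(m+1) <= N` loop of Source B
def pvAltLoop (N m best : Int) : Int :=
  if 2 * m * (m + 1) ≤ N then pvAltLoop N (m + 1) (pvAltInner N m best) else best
termination_by (N + 1 - m).toNat
decreasing_by
  have hmN : m ≤ N := by
    rcases (by omega : m ≤ 0 ∨ 1 ≤ m) with h | h
    · nlinarith [sq_nonneg (2 * m + 1)]
    · nlinarith
  omega

def pytha_calc_alt (N : Int) : Int := pvAltLoop N 2 (-1)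

-- ===== PRECONDITION & SPEC =====
def Spec_pytha_calc (N : Int) (out : Int) : Prop := out = pytha_calc_alt N
instance (N : Int) (out : Int) : Decidable (Spec_pytha_calc N out) := by unfold Spec_pytha_calc; infer_instance

-- ===== CLAIM (what is proved, stated in full; the proofs are below) =====
def Claim_equal_pytha_calc : Prop := ∀ (N : Int), Dom_pytha_calc N → Spec_pytha_calc N (pytha_calc N)

-- ===== LEMMAS AND PROOFS =====

-- the common «if cond then max acc (value) else acc» loop step
def pvMStep (q : Int → Bool) (v : Int → Int) : Int → Int → Int :=
  fun acc x => if q x then (if acc < v x then v x else acc) else acc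

-- A's per-a data: probed b, guard, candidate product
def pvBA (N a : Int) : Int := PySem.Int.floordiv (N ^ 2 - 2 * a * N) (2 * N - 2 * a)
def pvQA (N a : Int) : Bool :=
  decide (2 ≤ pvBA N a ∧ a ^ 2 + (pvBA N a) ^ 2 = (N - a - pvBA N a) ^ 2)
def pvVA (N a : Int) : Int := a * pvBA N a * (N - a - pvBA N a)

-- B's per-(m,n) data: divisibility guard, candidate product
def pvQB (N m n : Int) : Bool := decide (PySem.Int.mod N (2 * m * (m + n)) = 0)
def pvVB (N m n : Int) : Int :=
  let k := PySem.Int.floordiv N (2 * m * (m + n))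
  k * (m * m - n * n) * (2 * k * m * n) * (k * (m * m + n * n))

lemma pvMF_init (q : Int → Bool) (v : Int → Int) :
    ∀ (L : List Int) (init : Int), init ≤ L.foldl (pvMStep q v) init := by
  intro L
  induction L with
  | nil => intro init; simp
  | cons x L ih =>
      intro init
      refine le_trans ?_ (ih (pvMStep q v init x))
      simp only [pvMStep]
      split_ifs <;> omega

lemma pvMF_mem (q : Int → Bool) (v : Int → Int) :
    ∀ (L : List Int) (init x : Int), x ∈ L → q x = true →
      v x ≤ L.foldl (pvMStep q v) init := by
  intro L
  induction L with
  | nil => intro init x hx; simp at hx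
  | cons y L ih =>
      intro init x hx hq
      rcases List.mem_cons.mp hx with h | h
      · subst h
        refine le_trans ?_ (pvMF_init q v L (pvMStep q v init x))
        simp only [pvMStep, hq, if_true]
        split_ifs <;> omega
      · exact ih (pvMStep q v init y) x h hq

lemma pvMF_cases (q : Int → Bool) (v : Int → Int) :
    ∀ (L : List Int) (init : Int),
      L.foldl (pvMStep q v) init = init ∨
      ∃ x ∈ L, q x = true ∧ L.foldl (pvMStep q v) init = v x := by
  intro L
  induction L with
  | nil => intro init; left; rfl
  | cons x L ih =>
      intro init
      have h0 : (x :: L).foldl (pvMStep q v) init = L.foldl (pvMStep q v) (pvMStep q v init x) := rfl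
      rcases ih (pvMStep q v init x) with h | ⟨y, hy, hq, he⟩
      · rw [h0, h]
        by_cases hq : q x = true
        · by_cases hlt : init < v x
          · right; exact ⟨x, List.mem_cons_self, hq, by simp [pvMStep, hq, hlt]⟩
          · left; simp [pvMStep, hq, hlt]
        · left; simp [pvMStep, hq]
      · right; exact ⟨y, List.mem_cons_of_mem _ hy, hq, by rw [h0, he]⟩

-- A's fold is the generic max-fold
lemma pytha_calc_eq_mfold (N : Int) :
    pytha_calc N = (PySem.List.pyRange 1 (N - 4) 1).foldl (pvMStep (pvQA N) (pvVA N)) (-1) := by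
  unfold pytha_calc
  have hf : (fun (largest a : Int) =>
      let b := PySem.Int.floordiv (N ^ 2 - 2 * a * N) (2 * N - 2 * a)
      if 2 ≤ b then
        let c := N - a - b
        if a ^ 2 + b ^ 2 = c ^ 2 then
          let product := a * b * c
          if largest < product then product else largest
        else largest
      else largest) = pvMStep (pvQA N) (pvVA N) := by
    funext largest a
    simp only [pvMStep, pvQA, pvVA, pvBA, decide_eq_true_eq]
    all_goals first | rfl | (split_ifs <;> first | rfl | omega)
  rw [hf]

-- B's inner fold is the generic max-fold
lemma pvAltInner_eq_mfold (N m best : Int) :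
    pvAltInner N m best = (PySem.List.pyRange 1 m 1).foldl (pvMStep (pvQB N m) (pvVB N m)) best := by
  unfold pvAltInner
  have hf : (fun (best n : Int) =>
      let d := 2 * m * (m + n)
      if PySem.Int.mod N d = 0 then
        let k := PySem.Int.floordiv N d
        let p := k * (m * m - n * n) * (2 * k * m * n) * (k * (m * m + n * n))
        if best < p then p else best
      else best) = pvMStep (pvQB N m) (pvVB N m) := by
    funext best n
    simp only [pvMStep, pvQB, pvVB, decide_eq_true_eq]
  rw [hf]

lemma pvAltLoop_ge_init (N : Int) :
    ∀ (m best : Int), best ≤ pvAltLoop N m best := by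
  intro m best
  fun_induction pvAltLoop N m best with
  | case1 m best h ih =>
      refine le_trans ?_ ih
      rw [pvAltInner_eq_mfold]
      exact pvMF_init _ _ _ _
  | case2 m best h => exact le_refl _

lemma pvAltLoop_ge (N : Int) :
    ∀ (m0 best m n : Int), 2 ≤ m0 → m0 ≤ m → 2 * m * (m + 1) ≤ N →
      1 ≤ n → n < m → pvQB N m n = true →
      pvVB N m n ≤ pvAltLoop N m0 best := by
  have key : ∀ (t : Nat) (m0 best m n : Int), 2 ≤ m0 → m0 ≤ m → 2 * m * (m + 1) ≤ N →
      1 ≤ n → n < m → pvQB N m n = true → (m - m0).toNat = t →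
      pvVB N m n ≤ pvAltLoop N m0 best := by
    intro t
    induction t using Nat.strong_induction_on with
    | _ t ih =>
      intro m0 best m n h2 hle hN hn hnm hq ht
      have hguard : 2 * m0 * (m0 + 1) ≤ N := by
        nlinarith [mul_nonneg (sub_nonneg.mpr hle) (by linarith : (0:Int) ≤ m + m0 + 1)]
      rw [pvAltLoop, if_pos hguard]
      rcases eq_or_lt_of_le hle with heq | hlt
      · subst heq
        refine le_trans ?_ (pvAltLoop_ge_init N (m0 + 1) (pvAltInner N m0 best))
        rw [pvAltInner_eq_mfold]
        exact pvMF_mem _ _ _ _ n ((PySem.List.mem_pyRange_one).mpr ⟨hn, hnm⟩) hq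
      · exact ih (m - (m0 + 1)).toNat (by omega) (m0 + 1) _ m n (by omega) (by omega) hN hn hnm hq rfl
  intro m0 best m n h2 hle hN hn hnm hq
  exact key (m - m0).toNat m0 best m n h2 hle hN hn hnm hq rfl

lemma pvAltLoop_cases (N : Int) :
    ∀ (m best : Int),
      pvAltLoop N m best = best ∨
      ∃ m' n, m ≤ m' ∧ 2 * m' * (m' + 1) ≤ N ∧ 1 ≤ n ∧ n < m' ∧
        pvQB N m' n = true ∧ pvAltLoop N m best = pvVB N m' n := by
  intro m best
  fun_induction pvAltLoop N m best with
  | case1 m best h ih =>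
      rcases ih with h1 | ⟨m', n', hmm', hg, hn, hnm, hq, he⟩
      · rw [h1, pvAltInner_eq_mfold]
        rcases pvMF_cases (pvQB N m) (pvVB N m) (PySem.List.pyRange 1 m 1) best with h2 | ⟨x, hx, hqx, hex⟩
        · left; exact h2
        · right
          have hxr := (PySem.List.mem_pyRange_one).mp hx
          exact ⟨m, x, le_refl m, h, hxr.1, hxr.2, hqx, hex⟩
      · right; exact ⟨m', n', by omega, hg, hn, hnm, hq, he⟩
  | case2 m best h => left; rfl

-- Core 1: every Euclid candidate of B is found by A's scan, with the same product.
lemma pvCore1 (N m n : Int) (hm : 2 ≤ m) (hN : 2 * m * (m + 1) ≤ N)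
    (hn : 1 ≤ n) (hnm : n < m) (hq : pvQB N m n = true) :
    ∃ a, 1 ≤ a ∧ a < N - 4 ∧ pvQA N a = true ∧ pvVA N a = pvVB N m n := by
  have hd : (0:Int) < 2 * m * (m + n) := by nlinarith
  have hdvd : (2 * m * (m + n)) ∣ N :=
    (PySem.Int.mod_eq_zero_iff_dvd N _).mp (by simpa [pvQB] using hq)
  obtain ⟨k, hk⟩ := hdvd
  have hNpos : (0:Int) < N := by nlinarith
  have hkpos : (0:Int) < k := by
    by_contra h
    push Not at h
    nlinarith
  have hfd : PySem.Int.floordiv N (2 * m * (m + n)) = k := by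
    rw [PySem.Int.floordiv_eq_ediv_of_pos hd, hk,
      Int.mul_ediv_cancel_left _ (ne_of_gt hd)]
  have hn1m : n + 1 ≤ m := by omega
  have hmm : n * n + 2 * n + 1 ≤ m * m := by nlinarith
  set a := k * (m * m - n * n) with ha
  set b := 2 * k * m * n with hb
  set c := k * (m * m + n * n) with hc
  have ha1 : 3 ≤ a := by nlinarith
  have hb4 : 4 ≤ b := by nlinarith
  have hc5 : 5 ≤ c := by nlinarith
  have hsum : a + b + c = N := by rw [ha, hb, hc, hk]; ring
  have hpy : a ^ 2 + b ^ 2 = c ^ 2 := by rw [ha, hb, hc]; ring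
  have hbA : pvBA N a = b := by
    unfold pvBA
    have hpos : (0:Int) < 2 * N - 2 * a := by omega
    have hnum : N ^ 2 - 2 * a * N = b * (2 * N - 2 * a) := by
      rw [ha, hb, hk]; ring
    rw [hnum, PySem.Int.floordiv_eq_ediv_of_pos hpos,
      Int.mul_ediv_cancel _ (ne_of_gt hpos)]
  refine ⟨a, by omega, by omega, ?_, ?_⟩
  · simp only [pvQA, hbA, decide_eq_true_eq]
    exact ⟨by omega, by rw [show N - a - b = c by omega]; exact hpy⟩
  · show a * pvBA N a * (N - a - pvBA N a) = pvVB N m n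
    simp only [pvVB, hfd, hbA]
    rw [show N - a - b = c by omega, ha, hb, hc]

-- sign/order normalisation of Mathlib's classification
lemma pvNorm (x y c k m n : Int) (hx : x = k * (m ^ 2 - n ^ 2)) (hy : y = k * (2 * m * n))
    (hxp : 0 < x) (hyp : 0 < y) (hcp : 0 < c) (hsq : x * x + y * y = c * c) :
    ∃ K M n', 1 ≤ K ∧ 1 ≤ n' ∧ n' < M ∧
      x = K * (M * M - n' * n') ∧ y = K * (2 * M * n') ∧ c = K * (M * M + n' * n') := by
  rcases (by by_cases h : n * n ≤ m * m; exacts [Or.inl h, Or.inr (by omega)] : n * n ≤ m * m ∨ m * m < n * n) with hcmp | hcmp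
  · -- |n| ≤ |m| : K = k, M = |m|, n' = |n|
    have hk : 0 < k := by
      by_contra h
      push Not at h
      nlinarith
    have hmn : 0 < m * n := by
      by_contra h
      push Not at h
      nlinarith
    have hne : m * m ≠ n * n := by
      intro h
      nlinarith
    refine ⟨k, |m|, |n|, by omega, ?_, ?_, ?_, ?_, ?_⟩
    · have : n ≠ 0 := by rintro rfl; simp at hmn
      rcases abs_cases n with ⟨h1, h2⟩ | ⟨h1, h2⟩ <;> omega
    · have h1 : |n| * |n| < |m| * |m| := by
        rw [abs_mul_abs_self, abs_mul_abs_self]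
        exact lt_of_le_of_ne hcmp (fun h => hne h.symm)
      by_contra h
      push Not at h
      nlinarith [abs_nonneg m, abs_nonneg n, mul_le_mul h h (abs_nonneg m) (abs_nonneg n)]
    · rw [hx, abs_mul_abs_self, abs_mul_abs_self]; ring
    · have : |m| * |n| = m * n := by rw [← abs_mul, abs_of_pos hmn]
      rw [hy, show k * (2 * |m| * |n|) = 2 * k * (|m| * |n|) by ring, this]; ring
    · have hX : 0 < k * (|m| * |m| + |n| * |n|) := by
        rw [abs_mul_abs_self, abs_mul_abs_self]
        nlinarith
      have hc2 : (c - k * (|m| * |m| + |n| * |n|)) * (c + k * (|m| * |m| + |n| * |n|)) = 0 := by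
        rw [abs_mul_abs_self, abs_mul_abs_self]
        linear_combination (x + k * (m ^ 2 - n ^ 2)) * hx + (y + k * (2 * m * n)) * hy - hsq
      rcases mul_eq_zero.mp hc2 with h | h
      · linarith
      · linarith
  · -- |m| < |n| : K = -k, M = |n|, n' = |m|
    have hk : k < 0 := by
      by_contra h
      push Not at h
      nlinarith
    have hmn : m * n < 0 := by
      by_contra h
      push Not at h
      nlinarith
    refine ⟨-k, |n|, |m|, by omega, ?_, ?_, ?_, ?_, ?_⟩
    · have : m ≠ 0 := by rintro rfl; simp at hmn
      rcases abs_cases m with ⟨h1, h2⟩ | ⟨h1, h2⟩ <;> omega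
    · have h1 : |m| * |m| < |n| * |n| := by
        rw [abs_mul_abs_self, abs_mul_abs_self]
        exact hcmp
      by_contra h
      push Not at h
      nlinarith [abs_nonneg m, abs_nonneg n, mul_le_mul h h (abs_nonneg n) (abs_nonneg m)]
    · rw [hx, abs_mul_abs_self, abs_mul_abs_self]; ring
    · have : |n| * |m| = -(m * n) := by rw [mul_comm, ← abs_mul, abs_of_neg hmn]
      rw [hy, show -k * (2 * |n| * |m|) = -(2 * k) * (|n| * |m|) by ring, this]; ring
    · have hX : 0 < -k * (|n| * |n| + |m| * |m|) := by
        rw [abs_mul_abs_self, abs_mul_abs_self]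
        nlinarith
      have hc2 : (c - -k * (|n| * |n| + |m| * |m|)) * (c + -k * (|n| * |n| + |m| * |m|)) = 0 := by
        rw [abs_mul_abs_self, abs_mul_abs_self]
        linear_combination (x + k * (m ^ 2 - n ^ 2)) * hx + (y + k * (2 * m * n)) * hy - hsq
      rcases mul_eq_zero.mp hc2 with h | h
      · linarith
      · linarith

-- Core 2: every triple A finds is generated by some Euclid parameters B visits.
-- assembling a normalised Euclid triple into B's guards and candidate value
lemma pvAssemble (N x y c K M n' : Int) (hx : x = K * (M * M - n' * n'))
    (hy : y = K * (2 * M * n')) (hc : c = K * (M * M + n' * n'))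
    (hK : 1 ≤ K) (hn' : 1 ≤ n') (hM : n' < M) (hN : x + y + c = N) :
    2 ≤ M ∧ 2 * M * (M + 1) ≤ N ∧ pvQB N M n' = true ∧ pvVB N M n' = x * y * c := by
  have hM2 : 2 ≤ M := by omega
  have hd : (0:Int) < 2 * M * (M + n') := by nlinarith
  have hNd : N = 2 * M * (M + n') * K := by
    rw [← hN, hx, hy, hc]; ring
  have hdvd : (2 * M * (M + n')) ∣ N := ⟨K, hNd⟩
  have hfd : PySem.Int.floordiv N (2 * M * (M + n')) = K := by
    rw [PySem.Int.floordiv_eq_ediv_of_pos hd, hNd,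
      Int.mul_ediv_cancel_left _ (ne_of_gt hd)]
  refine ⟨hM2, by nlinarith, ?_, ?_⟩
  · simp only [pvQB, decide_eq_true_eq]
    exact (PySem.Int.mod_eq_zero_iff_dvd N _).mpr hdvd
  · simp only [pvVB, hfd]
    rw [hx, hy, hc]
    ring

lemma pvCore2 (N a : Int) (ha1 : 1 ≤ a) (ha2 : a < N - 4) (hq : pvQA N a = true) :
    ∃ m n, 2 ≤ m ∧ 2 * m * (m + 1) ≤ N ∧ 1 ≤ n ∧ n < m ∧
      pvQB N m n = true ∧ pvVB N m n = pvVA N a := by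
  simp only [pvQA, decide_eq_true_eq] at hq
  obtain ⟨h2b, heq⟩ := hq
  set b := pvBA N a with hbdef
  have hcpos : 0 < N - a - b := by nlinarith [heq, sq_nonneg a, sq_nonneg (N - a - b)]
  have hpy : a * a + b * b = (N - a - b) * (N - a - b) := by nlinarith [heq]
  have ht : PythagoreanTriple a b (N - a - b) := hpy
  obtain ⟨k, m0, n0, hcase, -⟩ := ht.classified
  have hVA : pvVA N a = a * b * (N - a - b) := rfl
  rcases hcase with ⟨hxa, hyb⟩ | ⟨hxa, hyb⟩
  · obtain ⟨K, M, n', hK, hn', hM, hx, hy, hc⟩ :=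
      pvNorm a b (N - a - b) k m0 n0 hxa hyb (by omega) (by omega) hcpos hpy
    obtain ⟨hM2, hNle, hqb, hv⟩ :=
      pvAssemble N a b (N - a - b) K M n' hx hy hc hK hn' hM (by ring)
    exact ⟨M, n', hM2, hNle, hn', hM, hqb, by rw [hv, hVA]⟩
  · obtain ⟨K, M, n', hK, hn', hM, hx, hy, hc⟩ :=
      pvNorm b a (N - a - b) k m0 n0 hyb hxa (by omega) (by omega) hcpos (by linarith [hpy])
    obtain ⟨hM2, hNle, hqb, hv⟩ :=
      pvAssemble N b a (N - a - b) K M n' hx hy hc hK hn' hM (by ring)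
    exact ⟨M, n', hM2, hNle, hn', hM, hqb, by rw [hv, hVA]; ring⟩

-- ===== VERDICT (by name: the statement is the Claim_ definition above) =====
theorem pytha_calc_spec : Claim_equal_pytha_calc := by
  intro N _
  unfold Spec_pytha_calc pytha_calc_alt
  rw [pytha_calc_eq_mfold]
  apply le_antisymm
  · rcases pvMF_cases (pvQA N) (pvVA N) (PySem.List.pyRange 1 (N - 4) 1) (-1) with h | ⟨a, ha, hq, he⟩
    · rw [h]; have := pvAltLoop_ge_init N 2 (-1); omega
    · rw [he]
      have hmem := (PySem.List.mem_pyRange_one).mp ha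
      obtain ⟨m, n, hm, hN2, hn, hnm, hqb, hv⟩ := pvCore2 N a hmem.1 hmem.2 hq
      rw [← hv]
      exact pvAltLoop_ge N 2 (-1) m n (by omega) hm hN2 hn hnm hqb
  · rcases pvAltLoop_cases N 2 (-1) with h | ⟨m, n, _, hN2, hn, hnm, hqb, he⟩
    · rw [h]; exact pvMF_init _ _ _ _
    · rw [he]
      obtain ⟨a, ha1, ha2, hqa, hv⟩ := pvCore1 N m n (by omega) hN2 hn hnm hqb
      rw [← hv]
      exact pvMF_mem (pvQA N) (pvVA N) _ _ a ((PySem.List.mem_pyRange_one).mpr ⟨ha1, ha2⟩) hqa
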